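-- pv_equiv track=rewrite | github.com/intel/pepc | tests/test_topology_cmdl.py | _get_target_cores
-- ===== SOURCE A (Python) =====
-- def _get_target_cores(all_cores: dict[int, list[int]],
--                       cores_range: tuple[int, int]) -> dict[int, list[int]]:
--     """
--     Get the target cores mapped by package number.
--
--     Args:
--         all_cores: All cores mapped by package number.
--         cores_range: A tuple containing the first and last core numbers in the range.
--
--     Returns:
--         The target cores mapped by package number.
--     """
--
--     first_core, last_core = cores_range
--     target_cores: dict[int, list[int]] = {}
--     for pkg, pkg_cores in all_cores.items():
--         core_nums = [core for core in range(first_core, last_core + 1) if core in pkg_cores]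
--         if core_nums:
--             target_cores[pkg] = core_nums
--
--     return target_cores
-- ===== SOURCE B (Python) =====
-- def _get_target_cores(all_cores, cores_range):
--     first_core, last_core = cores_range
--     return {pkg: nums
--             for pkg, pkg_cores in all_cores.items()
--             if (nums := sorted({c for c in pkg_cores if first_core <= c <= last_core}))}
-- ===== Notes on version B (the rewrite author's own statement) =====
-- stated objective: idiomatic
-- what changed: A scans every integer in the numeric range and tests list membership per integer while mutating an accumulator dict; B is a single dict comprehension that filters each package's own core list by the range, deduplicates with a set and sorts, building the result directly with no accumulator; its Lean port is structural recursion over the package list instead of a fold into a Dict.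
import Mathlib
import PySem

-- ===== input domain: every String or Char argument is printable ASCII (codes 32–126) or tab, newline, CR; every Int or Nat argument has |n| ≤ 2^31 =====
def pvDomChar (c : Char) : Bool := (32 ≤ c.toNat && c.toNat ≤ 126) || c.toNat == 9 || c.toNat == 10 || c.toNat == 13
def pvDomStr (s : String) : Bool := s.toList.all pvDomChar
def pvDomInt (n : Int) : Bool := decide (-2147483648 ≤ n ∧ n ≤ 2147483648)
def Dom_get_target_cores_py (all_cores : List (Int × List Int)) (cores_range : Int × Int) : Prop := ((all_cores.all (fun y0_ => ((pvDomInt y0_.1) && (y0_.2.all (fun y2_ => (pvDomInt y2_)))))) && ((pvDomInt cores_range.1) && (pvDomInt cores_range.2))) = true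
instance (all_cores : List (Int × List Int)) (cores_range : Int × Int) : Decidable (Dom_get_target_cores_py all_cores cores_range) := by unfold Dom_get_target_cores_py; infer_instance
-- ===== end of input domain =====

-- B replaces A's accumulator-dict loop over every integer of the numeric range by a direct
-- dict comprehension that filters each package's own core list, dedups and sorts (idiomatic rewrite).

-- ===== PORT A =====
def get_target_cores_py (all_cores : List (Int × List Int)) (cores_range : Int × Int) : List (Int × List Int) :=
  -- first_core, last_core = cores_range; for pkg, pkg_cores in all_cores.items(): …
  let first_core := cores_range.1
  let last_core := cores_range.2
  (all_cores.foldl (fun (target_cores : PySem.Dict Int (List Int)) pc =>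
    let core_nums := (PySem.List.pyRange first_core (last_core + 1) 1).filter
      (fun core => decide (core ∈ pc.2))
    if core_nums ≠ [] then target_cores.insert pc.1 core_nums else target_cores)
    PySem.Dict.empty).items

-- ===== PORT B =====
-- sorted({c for c in pkg_cores if first_core <= c <= last_core})
def pvSelect (lo hi : Int) (pkg_cores : List Int) : List Int :=
  PySem.List.sorted
    (PySem.Set.ofList (pkg_cores.filter (fun c => decide (lo ≤ c ∧ c ≤ hi)))) (fun x => x)

-- the dict comprehension, as structural recursion over the package list
def pvComp (lo hi : Int) : List (Int × List Int) → List (Int × List Int)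
  | [] => []
  | pc :: rest =>
    let nums := pvSelect lo hi pc.2
    if nums = [] then pvComp lo hi rest else (pc.1, nums) :: pvComp lo hi rest

def get_target_cores_py_alt (all_cores : List (Int × List Int)) (cores_range : Int × Int) : List (Int × List Int) :=
  pvComp cores_range.1 cores_range.2 all_cores

-- ===== PRECONDITION & SPEC =====
-- Pre_ requires distinct package keys: the argument is a Python dict, whose keys are
-- necessarily distinct, so this excludes only association lists no Python call can produce.
def Pre_get_target_cores_py (all_cores : List (Int × List Int)) (cores_range : Int × Int) : Prop :=
  (all_cores.map Prod.fst).Nodup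
instance (all_cores : List (Int × List Int)) (cores_range : Int × Int) : Decidable (Pre_get_target_cores_py all_cores cores_range) := by unfold Pre_get_target_cores_py; infer_instance

def pvWitness_get_target_cores_py : (List (Int × List Int)) × (Int × Int) := ([(0, [1, 2]), (1, [3])], (1, 3))

def Spec_get_target_cores_py (all_cores : List (Int × List Int)) (cores_range : Int × Int) (out : List (Int × List Int)) : Prop := out = get_target_cores_py_alt all_cores cores_range
instance (all_cores : List (Int × List Int)) (cores_range : Int × Int) (out : List (Int × List Int)) : Decidable (Spec_get_target_cores_py all_cores cores_range out) := by unfold Spec_get_target_cores_py; infer_instance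

-- ===== CLAIM =====
def Claim_equal_get_target_cores_py : Prop := ∀ (all_cores : List (Int × List Int)) (cores_range : Int × Int), Dom_get_target_cores_py all_cores cores_range → Pre_get_target_cores_py all_cores cores_range → Spec_get_target_cores_py all_cores cores_range (get_target_cores_py all_cores cores_range)

-- ===== LEMMAS AND PROOFS =====

-- The per-package core list A computes equals B's pvSelect.
theorem core_nums_eq (f l : Int) (cs : List Int) :
    (PySem.List.pyRange f (l + 1) 1).filter (fun core => decide (core ∈ cs)) =
      pvSelect f l cs := by
  have hpw : ((PySem.List.pyRange f (l + 1) 1).filter (fun core => decide (core ∈ cs))).Pairwise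
      (fun a b => a < b) :=
    (PySem.List.pairwise_lt_pyRange_one f (l + 1)).filter _
  have hperm : ((PySem.List.pyRange f (l + 1) 1).filter (fun core => decide (core ∈ cs))).Perm
      (PySem.Set.ofList (cs.filter (fun c => decide (f ≤ c ∧ c ≤ l)))) := by
    rw [List.perm_ext_iff_of_nodup (hpw.imp ne_of_lt) (PySem.Set.nodup_ofList _)]
    intro a
    simp [PySem.Set.mem_ofList, PySem.List.mem_pyRange_one, and_comm]
  exact (PySem.List.sorted_eq_of_perm_of_pairwise_lt _ _ _ hperm hpw).symm

-- Loop invariant: folding A's step over packages with fresh distinct keys appends B's comprehension.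
theorem fold_items_eq (f l : Int) :
    ∀ (xs : List (Int × List Int)) (d : PySem.Dict Int (List Int)),
      (xs.map Prod.fst).Nodup → (∀ p ∈ xs, d.contains p.1 = false) →
      (xs.foldl (fun (tc : PySem.Dict Int (List Int)) pc =>
        let core_nums := (PySem.List.pyRange f (l + 1) 1).filter
          (fun core => decide (core ∈ pc.2))
        if core_nums ≠ [] then tc.insert pc.1 core_nums else tc) d).items
        = d.items ++ pvComp f l xs := by
  intro xs
  induction xs with
  | nil => intro d _ _; simp [pvComp]
  | cons pc rest ih =>
    intro d hnd hfresh
    have hnd' : (rest.map Prod.fst).Nodup := (List.nodup_cons.mp hnd).2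
    have hne : ∀ p ∈ rest, p.1 ≠ pc.1 := by
      intro p hp
      have := (List.nodup_cons.mp hnd).1
      intro h; exact this (h ▸ List.mem_map_of_mem hp)
    have hsel := core_nums_eq f l pc.2
    simp only [List.foldl_cons, pvComp]
    by_cases hnil : pvSelect f l pc.2 = []
    · rw [if_neg (by rw [hsel]; exact not_not_intro hnil), if_pos hnil]
      exact ih d hnd' (fun p hp => hfresh p (List.mem_cons_of_mem _ hp))
    · rw [if_pos (by rw [hsel]; exact hnil), if_neg hnil, hsel]
      have hc : d.contains pc.1 = false := hfresh pc (List.mem_cons_self ..)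
      have hfresh' : ∀ p ∈ rest, (d.insert pc.1 (pvSelect f l pc.2)).contains p.1 = false := by
        intro p hp
        rw [PySem.Dict.contains_eq_isSome_get?,
          PySem.Dict.get?_insert_of_ne _ _ (hne p hp),
          ← PySem.Dict.contains_eq_isSome_get?]
        exact hfresh p (List.mem_cons_of_mem _ hp)
      rw [ih _ hnd' hfresh',
        PySem.Dict.items_insert_of_not_contains (h := hc)]
      simp

-- ===== VERDICT =====
theorem get_target_cores_py_spec : Claim_equal_get_target_cores_py := by
  intro all_cores cores_range _ hpre
  unfold Spec_get_target_cores_py get_target_cores_py get_target_cores_py_alt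
  rw [fold_items_eq cores_range.1 cores_range.2 all_cores PySem.Dict.empty hpre
    (fun p _ => PySem.Dict.contains_empty p.1)]
  rfl
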